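-- pv_equiv track=rewrite | github.com/lehoangbaochung/Console | ApplicationAlgorithm/test/unit1/unit1.py | function
-- ===== SOURCE A (Python) =====
-- def fibonacci(n):
--     if n < 2:
--         return n
--     else:
--         return fibonacci(n - 1) + fibonacci(n - 2)
--
-- def function(k):
--     if k < 1:
--         return 0
--     else:
--         i = 0
--         while (fibonacci(i) <= k):
--             i += 1
--         return fibonacci(i)
-- ===== SOURCE B (Python) =====
-- def function(k):
--     if k < 1:
--         return 0
--     a, b = 0, 1
--     while b <= k:
--         a, b = b, a + b
--     return b
-- ===== Notes on version B (the rewrite author's own statement) =====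
-- stated objective: faster
-- what changed: Replaces the exponential recursive fibonacci recomputed at every loop step by a single iterative pair (a,b) that generates Fibonacci numbers until the value exceeds k.
import Mathlib
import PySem

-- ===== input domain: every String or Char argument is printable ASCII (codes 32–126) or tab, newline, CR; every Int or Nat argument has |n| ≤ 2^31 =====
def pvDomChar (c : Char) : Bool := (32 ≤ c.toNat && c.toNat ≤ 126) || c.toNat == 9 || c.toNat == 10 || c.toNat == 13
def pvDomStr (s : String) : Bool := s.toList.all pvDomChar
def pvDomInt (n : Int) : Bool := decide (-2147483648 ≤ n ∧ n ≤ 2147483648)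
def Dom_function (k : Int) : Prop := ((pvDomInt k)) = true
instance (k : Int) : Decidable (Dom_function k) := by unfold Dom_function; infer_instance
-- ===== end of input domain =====

-- B replaces A's exponential recursive fibonacci (recomputed each loop step) by one
-- iterative Fibonacci pair generated until it exceeds k; same return value everywhere.

-- ===== PORT A =====
-- literal port of A's recursive fibonacci
def fibA (n : Int) : Int :=
  if n < 2 then n
  else fibA (n - 1) + fibA (n - 2)
termination_by n.toNat
decreasing_by all_goals omega

-- A's while loop (i += 1 until fibonacci(i) > k); fuel only makes the loop total —
-- within Dom (|k| ≤ 2^31 < fib 47) the loop always ends well before the fuel runs out.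
def loopA (k : Int) (i : Int) : Nat → Int
  | 0 => fibA i
  | f + 1 => if fibA i ≤ k then loopA k (i + 1) f else fibA i

def function (k : Int) : Int :=
  if k < 1 then 0
  else loopA k 0 65

-- ===== PORT B =====
-- B's while loop: a, b = b, a + b until b > k (fuel as above)
def loopB (k : Int) (a b : Int) : Nat → Int
  | 0 => b
  | f + 1 => if b ≤ k then loopB k b (a + b) f else b

def function_alt (k : Int) : Int :=
  if k < 1 then 0
  else loopB k 0 1 64

-- ===== PRECONDITION & SPEC =====
def Spec_function (k : Int) (out : Int) : Prop := out = function_alt k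
instance (k : Int) (out : Int) : Decidable (Spec_function k out) := by unfold Spec_function; infer_instance

-- ===== CLAIM (what is proved, stated in full; the proofs are below) =====
def Claim_equal_function : Prop := ∀ (k : Int), Dom_function k → Spec_function k (function k)

-- ===== LEMMAS AND PROOFS =====

-- mathematical Fibonacci on Nat indices
def F : Nat → Int
  | 0 => 0
  | 1 => 1
  | n + 2 => F n + F (n + 1)

theorem fibA_nat (n : Nat) : fibA (n : Int) = F n := by
  induction n using Nat.strong_induction_on with
  | _ n ih =>
    match n with
    | 0 => simp [fibA, F]
    | 1 => simp [fibA, F]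
    | m + 2 =>
      rw [fibA]
      have hc : ¬ ((((m : Nat) + 2 : Nat) : Int) < 2) := by push_cast; omega
      rw [if_neg hc]
      have h1 : (((m + 2 : Nat) : Int) - 1) = ((m + 1 : Nat) : Int) := by push_cast; ring
      have h2 : (((m + 2 : Nat) : Int) - 2) = ((m : Nat) : Int) := by push_cast; ring
      rw [h1, h2, ih (m + 1) (by omega), ih m (by omega)]
      show F (m + 1) + F m = F (m + 2)
      rw [show F (m + 2) = F m + F (m + 1) from rfl]; ring

theorem bridge (k : Int) (f : Nat) : ∀ (n : Nat),
    loopA k ((n : Int) + 1) f = loopB k (F n) (F (n + 1)) f := by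
  induction f with
  | zero =>
    intro n
    have h := fibA_nat (n + 1)
    push_cast at h
    simp [loopA, loopB, h]
  | succ f ih =>
    intro n
    have h := fibA_nat (n + 1)
    push_cast at h
    rw [loopA, loopB, h]
    by_cases hb : F (n + 1) ≤ k
    · rw [if_pos hb, if_pos hb]
      have := ih (n + 1)
      push_cast at this
      rw [show ((n : Int) + 1 + 1) = ((n : Int) + 1 + 1) from rfl]
      calc loopA k ((n : Int) + 1 + 1) f
          = loopB k (F (n + 1)) (F (n + 2)) f := this
        _ = loopB k (F (n + 1)) (F n + F (n + 1)) f := by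
              rw [show F (n + 2) = F n + F (n + 1) from rfl]
    · rw [if_neg hb, if_neg hb]

-- ===== VERDICT (by name: the statement is the Claim_ definition above) =====
theorem function_spec : Claim_equal_function := by
  intro k _
  unfold Spec_function function function_alt
  by_cases hk : k < 1
  · rw [if_pos hk, if_pos hk]
  · rw [if_neg hk, if_neg hk]
    have h0 : fibA 0 ≤ k := by
      rw [show (0 : Int) = ((0 : Nat) : Int) from rfl, fibA_nat]
      show F 0 ≤ k
      rw [show F 0 = 0 from rfl]; omega
    rw [show (65 : Nat) = 64 + 1 from rfl, loopA, if_pos h0]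
    have := bridge k 64 0
    simpa using this
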